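-- pv_equiv track=rewrite | github.com/jaehanbyun/Algorithm | 프로그래머스/PCCP실전모의고사2회/신입사원교육.py | solution
-- ===== SOURCE A (Python) =====
-- import heapq
--
-- def solution(abiility, number):
--     hQ = []
--     for em in abiility:
--         heapq.heappush(hQ, em)
--
--     while number > 0:
--         one = heapq.heappop(hQ)
--         two = heapq.heappop(hQ)
--         total = one+two
--
--         heapq.heappush(hQ, total)
--         heapq.heappush(hQ, total)
--
--         number -= 1
--
--     return sum(hQ)
-- ===== SOURCE B (Python) =====
-- def solution(abiility, number):
--     lst = list(abiility)
--     for _ in range(number):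
--         lst.sort()
--         one = lst.pop(0)
--         two = lst.pop(0)
--         total = one + two
--         lst.append(total)
--         lst.append(total)
--     return sum(lst)
-- ===== Notes on version B (the rewrite author's own statement) =====
-- stated objective: simpler
-- what changed: Replaces the binary heap (heapq push/pop) by a plain list that is fully re-sorted each round, popping the two front elements and appending their sum twice.
import Mathlib
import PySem

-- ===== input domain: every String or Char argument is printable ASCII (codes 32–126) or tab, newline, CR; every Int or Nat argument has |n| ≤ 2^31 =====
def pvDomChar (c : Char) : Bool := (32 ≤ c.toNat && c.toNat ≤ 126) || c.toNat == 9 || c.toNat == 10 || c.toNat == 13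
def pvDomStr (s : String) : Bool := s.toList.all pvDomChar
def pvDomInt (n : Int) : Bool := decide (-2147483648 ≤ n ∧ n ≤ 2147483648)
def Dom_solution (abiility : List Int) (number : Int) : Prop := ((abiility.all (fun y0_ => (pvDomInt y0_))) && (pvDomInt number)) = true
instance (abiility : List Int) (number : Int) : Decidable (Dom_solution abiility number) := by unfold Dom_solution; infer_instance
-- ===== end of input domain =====

-- B replaces A's binary heap with a plain list re-sorted each round (simpler, not faster).
-- Pre_solution excludes inputs where both programs raise IndexError (number > 0 with fewer than 2 elements).


-- ===== PORT A =====
-- heapq is a library; it is ported by its value semantics (which is all the returned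
-- sum can observe): heappush adds the element to the heap's multiset, heappop removes
-- and returns the smallest element (none = IndexError on an empty heap).
def pyHeappush (hQ : List Int) (x : Int) : List Int := hQ ++ [x]

def pyHeappop (hQ : List Int) : Option (Int × List Int) :=
  match PySem.List.min? hQ (fun x => x) with
  | none => none
  | some m => some (m, hQ.erase m)

-- 'while number > 0' loop; number.toNat is the number of iterations
def solutionLoop (hQ : List Int) (fuel : Nat) : Option (List Int) :=
  match fuel with
  | 0 => some hQ
  | n + 1 =>
    match pyHeappop hQ with
    | none => none
    | some (one, h1) =>
      match pyHeappop h1 with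
      | none => none
      | some (two, h2) =>
        let total := one + two
        solutionLoop (pyHeappush (pyHeappush h2 total) total) n

def solution (abiility : List Int) (number : Int) : Int :=
  let hQ := abiility.foldl pyHeappush []
  match solutionLoop hQ number.toNat with
  | none => 0   -- heappop raised IndexError; excluded by Pre_solution
  | some h => h.sum

-- ===== PORT B =====
-- 'for _ in range(number)' loop: sort, pop the two front elements, append total twice
def solutionAltLoop (lst : List Int) (fuel : Nat) : Option (List Int) :=
  match fuel with
  | 0 => some lst
  | n + 1 =>
    let s := PySem.List.sorted lst (fun x => x) false
    match PySem.List.pop? s 0 with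
    | none => none   -- lst.pop(0) raised IndexError; excluded by Pre_solution
    | some (one, s1) =>
      match PySem.List.pop? s1 0 with
      | none => none
      | some (two, s2) =>
        let total := one + two
        solutionAltLoop (s2 ++ [total] ++ [total]) n

def solution_alt (abiility : List Int) (number : Int) : Int :=
  match solutionAltLoop abiility number.toNat with
  | none => 0
  | some l => l.sum

-- ===== PRECONDITION & SPEC =====
-- Both programs raise IndexError iff number > 0 and the list has fewer than 2 elements.
def Pre_solution (abiility : List Int) (number : Int) : Prop :=
  number ≤ 0 ∨ 2 ≤ abiility.length
instance (abiility : List Int) (number : Int) : Decidable (Pre_solution abiility number) := by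
  unfold Pre_solution; infer_instance

def pvWitness_solution : List Int × Int := ([5, 2, 9, 1], 2)

def Spec_solution (abiility : List Int) (number : Int) (out : Int) : Prop := out = solution_alt abiility number
instance (abiility : List Int) (number : Int) (out : Int) : Decidable (Spec_solution abiility number out) := by unfold Spec_solution; infer_instance

-- ===== CLAIM (what is proved, stated in full; the proofs are below) =====
def Claim_equal_solution : Prop := ∀ (abiility : List Int) (number : Int), Dom_solution abiility number → Pre_solution abiility number → Spec_solution abiility number (solution abiility number)

-- ===== LEMMAS AND PROOFS =====

theorem foldl_heappush (l acc : List Int) : l.foldl pyHeappush acc = acc ++ l := by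
  induction l generalizing acc with
  | nil => simp
  | cons x t ih => simp [List.foldl, pyHeappush, ih]

theorem min?_of_perm_sorted_cons {h : List Int} {one : Int} {t : List Int}
    (hp : h.Perm (one :: t)) (hmin : ∀ y ∈ (one :: t), one ≤ y) :
    PySem.List.min? h (fun x => x) = some one := by
  have hne : h ≠ [] := by
    intro hnil; subst hnil
    exact absurd hp.length_eq (by simp)
  obtain ⟨m, hm⟩ : ∃ m, PySem.List.min? h (fun x => x) = some m := by
    cases hmm : PySem.List.min? h (fun x => x) with
    | none => exact absurd ((PySem.List.min?_eq_none_iff h (fun x => x)).mp hmm) hne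
    | some m => exact ⟨m, rfl⟩
  have hmem : m ∈ h := PySem.List.min?_mem hm
  have h1 : one ≤ m := hmin m (hp.mem_iff.mp hmem)
  have h2 : m ≤ one := PySem.List.min?_isMin hm one (hp.mem_iff.mpr (by simp))
  rw [hm, le_antisymm h2 h1]

-- main invariant: loops run in lockstep on permutation-equal states
theorem loop_perm (fuel : Nat) :
    ∀ (h l : List Int), h.Perm l → 2 ≤ l.length →
    ∃ h' l', solutionLoop h fuel = some h' ∧ solutionAltLoop l fuel = some l' ∧ h'.Perm l' := by
  induction fuel with
  | zero => exact fun h l hp _ => ⟨h, l, rfl, rfl, hp⟩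
  | succ n ih =>
    intro h l hp hlen
    have hsp : (PySem.List.sorted l (fun x => x) false).Perm l := PySem.List.sorted_perm l _ _
    have hslen : 2 ≤ (PySem.List.sorted l (fun x => x) false).length := by
      rw [hsp.length_eq]; exact hlen
    obtain ⟨one, two, rest, hcons⟩ : ∃ a b t, PySem.List.sorted l (fun x => x) false = a :: b :: t := by
      rcases hE : PySem.List.sorted l (fun x => x) false with _ | ⟨a, _ | ⟨b, t⟩⟩
      · rw [hE] at hslen; simp at hslen
      · rw [hE] at hslen; simp at hslen
      · exact ⟨a, b, t, rfl⟩
    have hpw : (PySem.List.sorted l (fun x => x) false).Pairwise (fun a b => a ≤ b) :=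
      PySem.List.sorted_pairwise l (fun x => x)
    rw [hcons] at hpw
    rw [hcons] at hsp
    have hone_min : ∀ y ∈ (one :: two :: rest), one ≤ y := by
      intro y hy
      rcases List.mem_cons.mp hy with h1 | h1
      · omega
      · exact (List.pairwise_cons.mp hpw).1 y h1
    have htwo_min : ∀ y ∈ (two :: rest), two ≤ y := by
      intro y hy
      rcases List.mem_cons.mp hy with h1 | h1
      · omega
      · exact (List.pairwise_cons.mp (List.pairwise_cons.mp hpw).2).1 y h1
    have hps : h.Perm (one :: two :: rest) := hp.trans hsp.symm
    -- first pop
    have hmin1 : PySem.List.min? h (fun x => x) = some one :=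
      min?_of_perm_sorted_cons hps hone_min
    have hp1 : (h.erase one).Perm (two :: rest) := by
      have := hps.erase one
      rwa [List.erase_cons_head] at this
    -- second pop
    have hmin2 : PySem.List.min? (h.erase one) (fun x => x) = some two :=
      min?_of_perm_sorted_cons hp1 htwo_min
    have hp2 : ((h.erase one).erase two).Perm rest := by
      have := hp1.erase two
      rwa [List.erase_cons_head] at this
    -- recurse
    have hrec := ih (pyHeappush (pyHeappush ((h.erase one).erase two) (one + two)) (one + two))
      (rest ++ [one + two] ++ [one + two])
      (by
        simp only [pyHeappush, List.append_assoc]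
        exact hp2.append (List.Perm.refl _))
      (by simp)
    obtain ⟨h', l', hA, hB, hperm⟩ := hrec
    refine ⟨h', l', ?_, ?_, hperm⟩
    · simp only [solutionLoop, pyHeappop, hmin1, hmin2]
      exact hA
    · simp only [solutionAltLoop, hcons, PySem.List.pop?_zero_cons]
      exact hB

-- ===== VERDICT (by name: the statement is the Claim_ definition above) =====
theorem solution_spec : Claim_equal_solution := by
  intro abiility number _ hpre
  unfold Spec_solution solution solution_alt
  rw [foldl_heappush]
  simp only [List.nil_append]
  by_cases hnum : number ≤ 0
  · rw [Int.toNat_of_nonpos hnum]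
    simp [solutionLoop, solutionAltLoop]
  · have hlen : 2 ≤ abiility.length := by
      rcases hpre with h | h
      · omega
      · exact h
    obtain ⟨h', l', hA, hB, hperm⟩ :=
      loop_perm number.toNat abiility abiility (List.Perm.refl _) hlen
    simp only [hA, hB]
    exact hperm.sum_eq
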